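-- pv_equiv track=rewrite | github.com/guige2023/rabai_autoclick | actions/data_transform_action.py | full_outer_join
-- ===== SOURCE A (Python) =====
-- from typing import Any, Callable, Dict, List, Optional, Set, Union
--
-- def full_outer_join(
--     left: List[Dict],
--     right: List[Dict],
--     left_key: str,
--     right_key: str,
-- ) -> List[Dict]:
--     """Full outer join on key."""
--     right_index = {item[right_key]: item for item in right if right_key in item}
--     left_keys = set(item.get(left_key) for item in left)
--
--     results = list(left)
--     for right_item in right:
--         key_val = right_item.get(right_key)
--         if key_val not in left_keys:
--             results.append(right_item)
--         else:
--             for i, left_item in enumerate(results):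
--                 if left_item.get(left_key) == key_val:
--                     results[i] = {**left_item, **right_item}
--                     break
--
--     return results
-- ===== SOURCE B (Python) =====
-- def full_outer_join(left, right, left_key, right_key):
--     """Full outer join on key: a hash index from key value to row position
--     replaces the per-row linear scan."""
--     index = {}
--     for pos, row in enumerate(left):
--         index.setdefault(row.get(left_key), pos)
--     results = list(left)
--     for row in right:
--         pos = index.get(row.get(right_key))
--         if pos is None:
--             results.append(row)
--         else:
--             results[pos] = {**results[pos], **row}
--     return results
-- ===== Notes on version B (the rewrite author's own statement) =====
-- stated objective: alternative
-- what changed: Replaces A's per-right-row linear scan of the growing results list by a hash index built once from left-key value to first row position, one dict lookup per right row; Pre_ excludes right rows that would be merged while carrying a conflicting left_key column, where A re-keys the merged row and silently drops later right rows that then find no match.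
import Mathlib
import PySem

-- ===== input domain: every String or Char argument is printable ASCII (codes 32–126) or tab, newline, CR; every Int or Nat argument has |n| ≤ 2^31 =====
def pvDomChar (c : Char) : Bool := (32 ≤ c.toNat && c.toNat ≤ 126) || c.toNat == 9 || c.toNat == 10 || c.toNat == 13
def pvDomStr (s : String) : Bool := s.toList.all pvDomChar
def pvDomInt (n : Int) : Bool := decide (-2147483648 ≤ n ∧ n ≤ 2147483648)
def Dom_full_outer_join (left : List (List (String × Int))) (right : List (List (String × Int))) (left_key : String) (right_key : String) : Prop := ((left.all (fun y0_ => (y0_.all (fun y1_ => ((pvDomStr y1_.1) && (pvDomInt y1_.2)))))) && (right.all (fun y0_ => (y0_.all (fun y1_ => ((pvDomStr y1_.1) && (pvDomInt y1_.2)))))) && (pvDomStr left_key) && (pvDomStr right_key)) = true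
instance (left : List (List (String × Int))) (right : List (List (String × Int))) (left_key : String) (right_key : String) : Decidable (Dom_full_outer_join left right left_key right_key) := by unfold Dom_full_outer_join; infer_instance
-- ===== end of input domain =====

-- B builds a hash index from left-key value to first row position once, so each right row
-- is matched by a single dict lookup instead of A's linear scan of the growing results list.

-- ===== PORT A =====
-- shared dict primitives (both Pythons call .get and {**a, **b} on the row dicts)
def dGet (item : List (String × Int)) (k : String) : Option Int :=
  (PySem.Dict.mk item).get? k

def dMerge (a b : List (String × Int)) : List (String × Int) :=
  (b.foldl (fun d p => d.insert p.1 p.2) (PySem.Dict.mk a)).items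

-- A's inner loop: 'for i, left_item in enumerate(results): if match: results[i] = merged; break'
def fojScan (lk : String) (kv : Option Int) (ri : List (String × Int)) :
    List (List (String × Int)) → List (List (String × Int))
  | [] => []
  | item :: rest =>
      if dGet item lk == kv then dMerge item ri :: rest
      else item :: fojScan lk kv ri rest

-- A's loop body over one right_item
def fojStep (lk rk : String) (left_keys : PySem.Set (Option Int))
    (results : List (List (String × Int))) (right_item : List (String × Int)) :
    List (List (String × Int)) :=
  let key_val := dGet right_item rk
  if !(PySem.Set.contains left_keys key_val) then results ++ [right_item]
  else fojScan lk key_val right_item results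

def full_outer_join (left : List (List (String × Int))) (right : List (List (String × Int))) (left_key : String) (right_key : String) : List (List (String × Int)) :=
  -- right_index is computed but never used by A; kept for faithfulness
  let _right_index : PySem.Dict Int (List (String × Int)) :=
    (right.filter (fun item => (PySem.Dict.mk item).contains right_key)).foldl
      (fun d item => d.insert ((dGet item right_key).getD 0) item) PySem.Dict.empty
  let left_keys : PySem.Set (Option Int) :=
    PySem.Set.ofList (left.map (fun item => dGet item left_key))
  right.foldl (fojStep left_key right_key left_keys) left

-- ===== PORT B =====
-- 'for pos, row in enumerate(left): index.setdefault(row.get(left_key), pos)'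
def altIndex (lk : String) :
    List (List (String × Int)) → Nat → PySem.Dict (Option Int) Nat →
    PySem.Dict (Option Int) Nat
  | [], _, d => d
  | row :: rest, pos, d => altIndex lk rest (pos + 1) (d.setdefault (dGet row lk) pos)

-- B's loop body: 'pos = index.get(row.get(right_key)); append if None else merge at pos'
def altStep (rk : String) (index : PySem.Dict (Option Int) Nat)
    (results : List (List (String × Int))) (row : List (String × Int)) :
    List (List (String × Int)) :=
  match index.get? (dGet row rk) with
  | none => results ++ [row]
  | some pos => results.set pos (dMerge (results.getD pos []) row)

def full_outer_join_alt (left : List (List (String × Int))) (right : List (List (String × Int))) (left_key : String) (right_key : String) : List (List (String × Int)) :=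
  right.foldl (altStep right_key (altIndex left_key left 0 PySem.Dict.empty)) left

-- ===== PRECONDITION & SPEC =====
-- Pre_ excludes right rows that would be merged (their right_key value occurs among the left
-- rows' left_key values) while carrying a left_key entry different from that value: there A
-- re-keys the merged row, and which row (if any) later right rows merge into is an accident
-- of A's scan; B always merges same-key rows into the first matching left row.
def Pre_full_outer_join (left : List (List (String × Int))) (right : List (List (String × Int))) (left_key : String) (right_key : String) : Prop :=
  ∀ r ∈ right, dGet r right_key ∈ left.map (fun item => dGet item left_key) →
    ∀ p ∈ r, p.1 = left_key → some p.2 = dGet r right_key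
instance (left : List (List (String × Int))) (right : List (List (String × Int))) (left_key : String) (right_key : String) : Decidable (Pre_full_outer_join left right left_key right_key) := by unfold Pre_full_outer_join; infer_instance

def pvWitness_full_outer_join : (List (List (String × Int))) × (List (List (String × Int))) × String × String :=
  ([[("id", 1), ("x", 5)], [("id", 2)]], [[("id", 1), ("y", 7)], [("id", 3), ("y", 8)]], "id", "id")

def Spec_full_outer_join (left : List (List (String × Int))) (right : List (List (String × Int))) (left_key : String) (right_key : String) (out : List (List (String × Int))) : Prop := out = full_outer_join_alt left right left_key right_key
instance (left : List (List (String × Int))) (right : List (List (String × Int))) (left_key : String) (right_key : String) (out : List (List (String × Int))) : Decidable (Spec_full_outer_join left right left_key right_key out) := by unfold Spec_full_outer_join; infer_instance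

-- ===== CLAIM (what is proved, stated in full; the proofs are below) =====
def Claim_equal_full_outer_join : Prop := ∀ (left : List (List (String × Int))) (right : List (List (String × Int))) (left_key : String) (right_key : String), Dom_full_outer_join left right left_key right_key → Pre_full_outer_join left right left_key right_key → Spec_full_outer_join left right left_key right_key (full_outer_join left right left_key right_key)

-- ===== LEMMAS AND PROOFS =====

-- the fold of row-inserts (the {**a, **b} merge) keeps a key's value when every b-entry at
-- that key carries exactly that value
theorem foldl_insert_get?_eq (k : String) (kv : Option Int) :
    ∀ (b : List (String × Int)) (d : PySem.Dict String Int),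
    (∀ p ∈ b, p.1 = k → some p.2 = kv) → d.get? k = kv →
    (b.foldl (fun d p => d.insert p.1 p.2) d).get? k = kv
  | [], d, _, hd => hd
  | p :: rest, d, hb, hd => by
      simp only [List.foldl_cons]
      refine foldl_insert_get?_eq k kv rest _ (fun q hq => hb q (List.mem_cons_of_mem _ hq)) ?_
      by_cases hp : p.1 = k
      · rw [← hp, PySem.Dict.get?_insert_self]
        exact hb p (by simp) hp
      · rw [PySem.Dict.get?_insert_of_ne _ _ (fun h => hp h.symm)]
        exact hd

theorem dGet_dMerge_eq (lk : String) (kv : Option Int) (a b : List (String × Int))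
    (hb : ∀ p ∈ b, p.1 = lk → some p.2 = kv) (ha : dGet a lk = kv) :
    dGet (dMerge a b) lk = kv := by
  simpa [dGet, dMerge] using foldl_insert_get?_eq lk kv b (PySem.Dict.mk a) hb ha

-- A's inner scan sets the FIRST matching index
theorem fojScan_eq_set (lk : String) (kv : Option Int) (ri : List (String × Int)) :
    ∀ (rs : List (List (String × Int))) (m : Nat) (hm : m < rs.length),
    (dGet rs[m] lk == kv) = true →
    (∀ k (hk : k < rs.length), k < m → (dGet rs[k] lk == kv) = false) →
    fojScan lk kv ri rs = rs.set m (dMerge (rs.getD m []) ri)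
  | item :: rest, m, hm, hP, hlt => by
      by_cases h0 : (dGet item lk == kv) = true
      · have hm0 : m = 0 := by
          by_contra hne
          have h00 := hlt 0 (by simp) (Nat.pos_of_ne_zero hne)
          simp only [List.getElem_cons_zero] at h00
          rw [h00] at h0
          exact absurd h0 (by simp)
        subst hm0
        simp only [fojScan, h0, if_true, List.set_cons_zero]
        rfl
      · have hm0 : m ≠ 0 := by
          intro he; subst he
          simp only [List.getElem_cons_zero] at hP
          exact h0 hP
        obtain ⟨m', rfl⟩ := Nat.exists_eq_succ_of_ne_zero hm0
        simp only [fojScan]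
        rw [if_neg h0, List.set_cons_succ]
        have hrec := fojScan_eq_set lk kv ri rest m'
          (by simpa using hm)
          (by simpa using hP)
          (fun k hk hkm => by
            have := hlt (k + 1) (by simpa using hk) (by omega)
            simpa using this)
        rw [hrec]
        have : (item :: rest).getD (m' + 1) [] = rest.getD m' [] := by
          rw [List.getD_eq_getElem _ _ hm, List.getD_eq_getElem _ _ (by simpa using hm)]
          simp
        rw [this]

-- lookup in B's index: first occurrence, offset by the start counter
theorem altIndex_get? (lk : String) :
    ∀ (l : List (List (String × Int))) (pos : Nat) (d : PySem.Dict (Option Int) Nat)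
      (v : Option Int),
    (altIndex lk l pos d).get? v =
      match d.get? v with
      | some j => some j
      | none => (l.findIdx? (fun row => dGet row lk == v)).map (· + pos)
  | [], pos, d, v => by cases hd : d.get? v <;> simp [altIndex, hd]
  | row :: rest, pos, d, v => by
      simp only [altIndex]
      rw [altIndex_get? lk rest (pos + 1) _ v]
      by_cases hv : v = dGet row lk
      · subst hv
        rw [PySem.Dict.get?_setdefault_self]
        cases hd : d.get? (dGet row lk) with
        | some j => simp
        | none =>
          simp only [Option.getD_none]
          rw [List.findIdx?_cons]
          simp
      · rw [PySem.Dict.get?_setdefault_of_ne _ _ hv]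
        cases hd : d.get? v with
        | some j => simp
        | none =>
          simp only []
          rw [List.findIdx?_cons]
          have : (dGet row lk == v) = false := by
            simp only [beq_eq_false_iff_ne]; exact fun h => hv h.symm
          rw [this]
          simp only [Bool.false_eq_true, if_false, Option.map_map]
          cases List.findIdx? (fun row => dGet row lk == v) rest <;> simp [Nat.add_comm 1 pos]

-- the invariant carried along the right-fold: the first left.length rows of results
-- still carry their original left-key values
def FojInv (lk : String) (left rs : List (List (String × Int))) : Prop :=
  left.length ≤ rs.length ∧
  ∀ i, i < left.length → dGet (rs.getD i []) lk = dGet (left.getD i []) lk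

-- one right row: A's step and B's step agree, and the invariant survives
theorem foj_step_sim (lk rk : String) (left : List (List (String × Int)))
    (rs : List (List (String × Int))) (row : List (String × Int))
    (hinv : FojInv lk left rs)
    (hrow : dGet row rk ∈ left.map (fun item => dGet item lk) →
      ∀ p ∈ row, p.1 = lk → some p.2 = dGet row rk) :
    fojStep lk rk (PySem.Set.ofList (left.map (fun item => dGet item lk))) rs row
      = altStep rk (altIndex lk left 0 PySem.Dict.empty) rs row ∧
    FojInv lk left (altStep rk (altIndex lk left 0 PySem.Dict.empty) rs row) := by
  obtain ⟨hlen, hpre⟩ := hinv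
  set kv := dGet row rk with hkv
  have hidx : (altIndex lk left 0 PySem.Dict.empty).get? kv
      = (left.findIdx? (fun r => dGet r lk == kv)).map (· + 0) := by
    rw [altIndex_get? lk left 0 PySem.Dict.empty kv, PySem.Dict.get?_empty]
  by_cases hmem : kv ∈ left.map (fun item => dGet item lk)
  · -- merge branch
    obtain ⟨r0, hr0, hr0v⟩ := List.mem_map.mp hmem
    have hfind : (left.findIdx? (fun r => dGet r lk == kv)).isSome := by
      rw [List.findIdx?_isSome]
      exact List.any_eq_true.mpr ⟨r0, hr0, by simp [hr0v]⟩
    obtain ⟨j, hj⟩ := Option.isSome_iff_exists.mp hfind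
    obtain ⟨hjlt, hjP, hjmin'⟩ := List.findIdx?_eq_some_iff_getElem.mp hj
    have hjmin : ∀ k (hk : k < left.length), k < j → (dGet left[k] lk == kv) = false := by
      intro k hk hkj
      have h2 := hjmin' k hkj
      simpa using h2
    have hcont : PySem.Set.contains
        (PySem.Set.ofList (left.map (fun item => dGet item lk))) kv = true := by
      rw [PySem.Set.contains_iff]
      exact (PySem.Set.mem_ofList _ _).mpr hmem
    have hjrs : j < rs.length := lt_of_lt_of_le hjlt hlen
    -- results rows below left.length still carry left's values
    have hval : ∀ k, k < left.length → dGet (rs.getD k []) lk = dGet (left.getD k []) lk := hpre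
    have hrsP : (dGet rs[j] lk == kv) = true := by
      have := hval j hjlt
      rw [List.getD_eq_getElem _ _ hjrs, List.getD_eq_getElem _ _ hjlt] at this
      rw [this]; exact hjP
    have hrsmin : ∀ k (hk : k < rs.length), k < j → (dGet rs[k] lk == kv) = false := by
      intro k hk hkj
      have hkl : k < left.length := lt_of_lt_of_le (lt_trans hkj hjlt) (le_refl _)
      have := hval k hkl
      rw [List.getD_eq_getElem _ _ hk, List.getD_eq_getElem _ _ hkl] at this
      rw [this]; exact hjmin k hkl hkj
    have hA : fojStep lk rk (PySem.Set.ofList (left.map (fun item => dGet item lk))) rs row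
        = rs.set j (dMerge (rs.getD j []) row) := by
      simp only [fojStep, ← hkv, hcont, Bool.not_true, Bool.false_eq_true, if_false]
      exact fojScan_eq_set lk kv row rs j hjrs hrsP hrsmin
    have hB : altStep rk (altIndex lk left 0 PySem.Dict.empty) rs row
        = rs.set j (dMerge (rs.getD j []) row) := by
      simp only [altStep, ← hkv, hidx, hj]
      rfl
    refine ⟨hA.trans hB.symm, ?_⟩
    rw [hB]
    refine ⟨by simpa using hlen, ?_⟩
    intro i hi
    by_cases hij : i = j
    · subst hij
      have hset : (rs.set i (dMerge (rs.getD i []) row)).getD i []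
          = dMerge (rs.getD i []) row := by
        rw [List.getD_eq_getElem _ _ (by simpa using hjrs)]
        simp [List.getElem_set_self]
      rw [hset]
      have hvi : dGet (rs.getD i []) lk = kv := by
        rw [List.getD_eq_getElem _ _ hjrs]
        simpa using hrsP
      have : dGet (left.getD i []) lk = kv := by
        rw [← hval i hi]; exact hvi
      rw [this]
      exact dGet_dMerge_eq lk kv _ row (hrow hmem) hvi
    · have hset : (rs.set j (dMerge (rs.getD j []) row)).getD i [] = rs.getD i [] := by
        by_cases hil : i < rs.length
        · rw [List.getD_eq_getElem _ _ (by simpa using hil),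
              List.getD_eq_getElem _ _ hil]
          rw [List.getElem_set_ne (fun h => hij h.symm)]
        · rw [List.getD_eq_default _ _ (by simpa using Nat.le_of_not_lt hil),
              List.getD_eq_default _ _ (Nat.le_of_not_lt hil)]
      rw [hset]
      exact hpre i hi
  · -- append branch
    have hcont : PySem.Set.contains
        (PySem.Set.ofList (left.map (fun item => dGet item lk))) kv = false := by
      rw [← Bool.not_eq_true, PySem.Set.contains_iff]
      exact fun h => hmem ((PySem.Set.mem_ofList _ _).mp h)
    have hfind : left.findIdx? (fun r => dGet r lk == kv) = none := by
      rw [List.findIdx?_eq_none_iff]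
      intro r hr
      simp only [beq_eq_false_iff_ne]
      exact fun h => hmem (List.mem_map.mpr ⟨r, hr, h⟩)
    have hA : fojStep lk rk (PySem.Set.ofList (left.map (fun item => dGet item lk))) rs row
        = rs ++ [row] := by
      simp only [fojStep, ← hkv, hcont]
      rfl
    have hB : altStep rk (altIndex lk left 0 PySem.Dict.empty) rs row = rs ++ [row] := by
      simp only [altStep, ← hkv, hidx, hfind]
      rfl
    refine ⟨hA.trans hB.symm, ?_⟩
    rw [hB]
    refine ⟨by simp; omega, ?_⟩
    intro i hi
    have hil : i < rs.length := lt_of_lt_of_le hi hlen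
    have hil2 : i < (rs ++ [row]).length := by simp; omega
    rw [List.getD_eq_getElem _ _ hil2, List.getElem_append_left hil,
        ← List.getD_eq_getElem _ _ hil]
    exact hpre i hi

theorem foj_foldl_sim (lk rk : String) (left : List (List (String × Int))) :
    ∀ (right rs : List (List (String × Int))),
    FojInv lk left rs →
    (∀ r ∈ right, dGet r rk ∈ left.map (fun item => dGet item lk) →
      ∀ p ∈ r, p.1 = lk → some p.2 = dGet r rk) →
    right.foldl (fojStep lk rk (PySem.Set.ofList (left.map (fun item => dGet item lk)))) rs
      = right.foldl (altStep rk (altIndex lk left 0 PySem.Dict.empty)) rs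
  | [], rs, _, _ => rfl
  | row :: rest, rs, hinv, hpre => by
      obtain ⟨h1, h2⟩ := foj_step_sim lk rk left rs row hinv (hpre row (by simp))
      simp only [List.foldl_cons]
      rw [h1]
      exact foj_foldl_sim lk rk left rest _ h2
        (fun r hr => hpre r (List.mem_cons_of_mem _ hr))

-- ===== VERDICT (by name: the statement is the Claim_ definition above) =====
theorem full_outer_join_spec : Claim_equal_full_outer_join := by
  intro left right lk rk _ hPre
  show right.foldl (fojStep lk rk (PySem.Set.ofList (left.map (fun item => dGet item lk)))) left
      = right.foldl (altStep rk (altIndex lk left 0 PySem.Dict.empty)) left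
  exact foj_foldl_sim lk rk left right left
    ⟨le_refl _, fun i _ => rfl⟩ hPre
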